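-- pv_equiv track=rewrite | github.com/data-weaverss/algorithm | somin/백준/37_팰린드롬.py | solution
-- ===== SOURCE A (Python) =====
-- def solution(numbers, N):
--     # dp[i][j]: numbers[i-1:j]의 팰린드롬 여부 저장.
--     # 팰린드롬 이면 1, 아니면 0
--     dp = [[0] * (N + 1) for _ in range(N + 1)]
--
--     for i in range(1, N + 1): # 길이 1
--         dp[i][i] = 1
--
--     for i in range(1, N): # 길이 2
--         if numbers[i - 1] == numbers[i]:
--             dp[i][i + 1] = 1
--
--     for length in range(3, N + 1): # 길이 3 이상
--         for start in range(1, N - length + 2):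
--             end = start + length - 1
--             if dp[start + 1][end - 1] == 0:
--                 continue
--             if numbers[start - 1] == numbers[end - 1]:
--                 dp[start][end] = 1
--
--     return dp
-- ===== SOURCE B (Python) =====
-- def solution(numbers, N):
--     # Directly test each cell: a two-pointer palindrome check per (i, j),
--     # instead of A's length-ordered DP over a mutable table.
--     def pal(i, j):
--         while i < j:
--             if numbers[i - 1] != numbers[j - 1]:
--                 return False
--             i += 1
--             j -= 1
--         return True
--
--     return [[1 if 1 <= i <= j and pal(i, j) else 0 for j in range(N + 1)]
--             for i in range(N + 1)]
-- ===== Notes on version B (the rewrite author's own statement) =====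
-- stated objective: simpler
-- what changed: B replaces A's length-ordered DP over a mutable (N+1)x(N+1) table by a nested comprehension that fills each cell directly with a two-pointer palindrome check, so no table is mutated and no cell depends on another.
import Mathlib
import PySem

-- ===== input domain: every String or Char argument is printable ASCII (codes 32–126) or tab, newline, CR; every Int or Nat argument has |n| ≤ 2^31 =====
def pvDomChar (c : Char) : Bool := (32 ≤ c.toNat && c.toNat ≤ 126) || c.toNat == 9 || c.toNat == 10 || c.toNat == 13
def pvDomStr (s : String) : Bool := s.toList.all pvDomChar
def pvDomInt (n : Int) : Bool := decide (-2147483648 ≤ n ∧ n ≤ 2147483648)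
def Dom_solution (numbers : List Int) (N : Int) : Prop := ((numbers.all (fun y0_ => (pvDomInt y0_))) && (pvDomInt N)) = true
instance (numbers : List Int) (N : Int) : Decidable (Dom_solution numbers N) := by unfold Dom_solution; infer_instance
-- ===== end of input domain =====

-- B fills each cell of the palindrome table directly with a two-pointer check (a nested
-- comprehension) instead of A's length-ordered DP over a mutable table; simpler, not faster.


-- ===== PORT A =====
-- dp[i][j] read / write (all accesses A makes are in range on Pre_ inputs)
def cellGet (dp : List (List Int)) (i j : Int) : Int :=
  PySem.List.pyGetD (PySem.List.pyGetD dp i []) j 0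

def cellSet (dp : List (List Int)) (i j : Int) : List (List Int) :=
  PySem.List.pySetD dp i (PySem.List.pySetD (PySem.List.pyGetD dp i []) j (1 : Int))

def solution (numbers : List Int) (N : Int) : List (List Int) :=
  -- dp = [[0] * (N + 1) for _ in range(N + 1)]
  let dp0 := (PySem.List.pyRange 0 (N + 1) 1).map (fun _ => PySem.List.pyRepeat [(0 : Int)] (N + 1));
  -- for i in range(1, N + 1): dp[i][i] = 1
  let dp1 := (PySem.List.pyRange 1 (N + 1) 1).foldl (fun dp i => cellSet dp i i) dp0;
  -- for i in range(1, N): if numbers[i-1] == numbers[i]: dp[i][i+1] = 1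
  let dp2 := (PySem.List.pyRange 1 N 1).foldl (fun dp i =>
      if PySem.List.pyGetD numbers (i - 1) 0 == PySem.List.pyGetD numbers i 0
      then cellSet dp i (i + 1) else dp) dp1;
  -- for length in range(3, N + 1): for start in range(1, N - length + 2): …
  (PySem.List.pyRange 3 (N + 1) 1).foldl (fun dp length =>
      (PySem.List.pyRange 1 (N - length + 2) 1).foldl (fun dp start =>
        let e := start + length - 1;
        if cellGet dp (start + 1) (e - 1) == 0 then dp
        else if PySem.List.pyGetD numbers (start - 1) 0 == PySem.List.pyGetD numbers (e - 1) 0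
             then cellSet dp start e else dp) dp) dp2

-- ===== PORT B =====
-- while i < j: if numbers[i-1] != numbers[j-1]: return False; i += 1; j -= 1 / return True
def palChk (numbers : List Int) (i j : Int) : Bool :=
  if i < j then
    if PySem.List.pyGetD numbers (i - 1) 0 != PySem.List.pyGetD numbers (j - 1) 0 then false
    else palChk numbers (i + 1) (j - 1)
  else true
termination_by (j - i).toNat
decreasing_by omega

def solution_alt (numbers : List Int) (N : Int) : List (List Int) :=
  (PySem.List.pyRange 0 (N + 1) 1).map (fun i =>
    (PySem.List.pyRange 0 (N + 1) 1).map (fun j =>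
      if 1 ≤ i ∧ i ≤ j ∧ palChk numbers i j then (1 : Int) else 0))

-- ===== PRECONDITION & SPEC =====
-- Pre_ excludes exactly the inputs where A raises IndexError: N ≥ 2 together with
-- N > len(numbers) (for N ≤ 1 A never indexes numbers). B raises there as well.
def Pre_solution (numbers : List Int) (N : Int) : Prop :=
  N ≤ (numbers.length : Int) ∨ N ≤ 1

instance (numbers : List Int) (N : Int) : Decidable (Pre_solution numbers N) := by
  unfold Pre_solution; infer_instance

def pvWitness_solution : List Int × Int := ([1, 2, 1], 3)

def Spec_solution (numbers : List Int) (N : Int) (out : List (List Int)) : Prop := out = solution_alt numbers N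
instance (numbers : List Int) (N : Int) (out : List (List Int)) : Decidable (Spec_solution numbers N out) := by unfold Spec_solution; infer_instance

-- ===== CLAIM (what is proved, stated in full; the proofs are below) =====
def Claim_equal_solution : Prop := ∀ (numbers : List Int) (N : Int), Dom_solution numbers N → Pre_solution numbers N → Spec_solution numbers N (solution numbers N)

-- ===== LEMMAS AND PROOFS =====

-- the table both programs compute: 1 on palindromic substrings of the upper triangle, else 0
def Tgt (numbers : List Int) (N i j : Int) : Int :=
  if 1 ≤ i ∧ i ≤ j ∧ j ≤ N ∧ palChk numbers i j then 1 else 0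

theorem pyGetD_nonneg {α : Type} (xs : List α) (i : Int) (d : α) (h : 0 ≤ i) :
    PySem.List.pyGetD xs i d = xs.getD i.toNat d := by
  rw [← Int.toNat_of_nonneg h, PySem.List.pyGetD_natCast, Int.toNat_natCast]

theorem getD_replicate' {α : Type} (M m : Nat) (a d : α) :
    (List.replicate M a).getD m d = if m < M then a else d := by
  rw [List.getD_eq_getElem?_getD, List.getElem?_replicate]
  split <;> simp

theorem dp0_eq (N : Int) :
    (PySem.List.pyRange 0 (N + 1) 1).map (fun _ => PySem.List.pyRepeat [(0 : Int)] (N + 1))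
      = List.replicate (N + 1).toNat (List.replicate (N + 1).toNat 0) := by
  have h1 : ∀ x ∈ PySem.List.pyRange 0 (N + 1) 1,
      PySem.List.pyRepeat [(0 : Int)] (N + 1) = List.replicate (N + 1).toNat 0 :=
    fun _ _ => PySem.List.pyRepeat_singleton _ _
  rw [List.map_congr_left h1, List.map_const', PySem.List.length_pyRange_one]
  norm_num

theorem cellGet_replicate (M : Nat) (i j : Int) (hi : 0 ≤ i) (hj : 0 ≤ j) :
    cellGet (List.replicate M (List.replicate M (0 : Int))) i j = 0 := by
  unfold cellGet
  rw [pyGetD_nonneg _ _ _ hi, pyGetD_nonneg _ _ _ hj, getD_replicate']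
  split
  · rw [getD_replicate']; split <;> rfl
  · rfl

theorem cellSet_length (dp : List (List Int)) (a b : Int) :
    (cellSet dp a b).length = dp.length := by
  unfold cellSet; exact PySem.List.length_pySetD _ _ _

theorem cellSet_rows (dp : List (List Int)) (a b : Int) (M : Nat) (ha : 0 ≤ a)
    (ha' : a.toNat < dp.length)
    (h2 : ∀ r ∈ dp, r.length = M) : ∀ r ∈ cellSet dp a b, r.length = M := by
  intro r hr
  unfold cellSet at hr
  rw [PySem.List.pySetD_of_nonneg _ _ ha] at hr
  rcases List.mem_or_eq_of_mem_set hr with h | rfl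
  · exact h2 _ h
  · rw [PySem.List.length_pySetD, pyGetD_nonneg _ _ _ ha, List.getD_eq_getElem?_getD,
      List.getElem?_eq_getElem ha']
    exact h2 _ (List.getElem_mem ha')

theorem cellGet_cellSet (dp : List (List Int)) (M : Nat) (a b i j : Int)
    (h1 : dp.length = M) (h2 : ∀ r ∈ dp, r.length = M)
    (ha : 0 ≤ a) (ha' : a.toNat < M) (hb : 0 ≤ b) (hb' : b.toNat < M)
    (hi : 0 ≤ i) (hj : 0 ≤ j) :
    cellGet (cellSet dp a b) i j = if i = a ∧ j = b then 1 else cellGet dp i j := by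
  unfold cellGet cellSet
  rw [PySem.List.pySetD_of_nonneg _ _ ha, PySem.List.pySetD_of_nonneg _ _ hb]
  simp only [pyGetD_nonneg _ _ _ hi, pyGetD_nonneg _ _ _ hj, pyGetD_nonneg _ _ _ ha]
  have hrowlen : (dp.getD a.toNat []).length = M := by
    rw [List.getD_eq_getElem?_getD, List.getElem?_eq_getElem (h1 ▸ ha')]
    exact h2 _ (List.getElem_mem _)
  by_cases hia : i.toNat = a.toNat
  · have hia' : i = a := by omega
    have houter : (dp.set a.toNat ((dp.getD a.toNat []).set b.toNat 1)).getD i.toNat []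
        = (dp.getD a.toNat []).set b.toNat 1 := by
      rw [List.getD_eq_getElem?_getD, hia, List.getElem?_set,
        if_pos rfl, if_pos (by omega : a.toNat < dp.length)]
      rfl
    rw [houter]
    by_cases hjb : j.toNat = b.toNat
    · have hjb' : j = b := by omega
      rw [List.getD_eq_getElem?_getD, hjb, List.getElem?_set, if_pos rfl,
        if_pos (by omega : b.toNat < (dp.getD a.toNat []).length), if_pos ⟨hia', hjb'⟩]
      rfl
    · rw [List.getD_eq_getElem?_getD, List.getElem?_set,
        if_neg (fun h => hjb h.symm), if_neg (by rintro ⟨rfl, rfl⟩; exact hjb rfl),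
        ← List.getD_eq_getElem?_getD, hia']
  · have houter : (dp.set a.toNat ((dp.getD a.toNat []).set b.toNat 1)).getD i.toNat []
        = dp.getD i.toNat [] := by
      rw [List.getD_eq_getElem?_getD, List.getElem?_set, if_neg (fun h => hia h.symm),
        ← List.getD_eq_getElem?_getD]
    rw [houter, if_neg (by rintro ⟨rfl, rfl⟩; exact hia rfl)]

theorem palChk_of_ge (numbers : List Int) (i j : Int) (h : j ≤ i) :
    palChk numbers i j = true := by
  rw [palChk, if_neg (by omega)]

theorem palChk_step (numbers : List Int) (i j : Int) (h : i < j) :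
    palChk numbers i j
      = ((PySem.List.pyGetD numbers (i - 1) 0 == PySem.List.pyGetD numbers (j - 1) 0)
          && palChk numbers (i + 1) (j - 1)) := by
  rw [palChk, if_pos h]
  rcases hb : (PySem.List.pyGetD numbers (i - 1) 0 == PySem.List.pyGetD numbers (j - 1) 0)
  · simp [bne, hb]
  · simp [bne, hb]

theorem palChk_two (numbers : List Int) (i : Int) :
    palChk numbers i (i + 1)
      = (PySem.List.pyGetD numbers (i - 1) 0 == PySem.List.pyGetD numbers i 0) := by
  rw [palChk_step numbers i (i + 1) (by omega)]
  have h : i + 1 - 1 = i := by ring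
  rw [h, palChk_of_ge numbers (i + 1) i (by omega), Bool.and_true]

-- generic conditional-write loop: each iteration possibly sets one cell to 1
theorem foldl_cellSet_generic (M : Nat) (c : Int → Bool) (f g : Int → Int) :
    ∀ (L : List Int) (dp : List (List Int)),
      dp.length = M → (∀ r ∈ dp, r.length = M) →
      (∀ k ∈ L, 0 ≤ f k ∧ (f k).toNat < M ∧ 0 ≤ g k ∧ (g k).toNat < M) →
      ((L.foldl (fun dp k => if c k then cellSet dp (f k) (g k) else dp) dp).length = M ∧
       (∀ r ∈ L.foldl (fun dp k => if c k then cellSet dp (f k) (g k) else dp) dp, r.length = M) ∧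
       ∀ i j : Int, 0 ≤ i → 0 ≤ j →
         cellGet (L.foldl (fun dp k => if c k then cellSet dp (f k) (g k) else dp) dp) i j =
           if ∃ k ∈ L, c k = true ∧ f k = i ∧ g k = j then 1 else cellGet dp i j) := by
  intro L
  induction L with
  | nil => intro dp h1 h2 _; exact ⟨h1, h2, fun i j _ _ => by simp⟩
  | cons k L ih =>
    intro dp h1 h2 hb
    obtain ⟨hbk1, hbk2, hbk3, hbk4⟩ := hb k List.mem_cons_self
    have h1' : (if c k then cellSet dp (f k) (g k) else dp).length = M := by
      split
      · rw [cellSet_length]; exact h1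
      · exact h1
    have h2' : ∀ r ∈ (if c k then cellSet dp (f k) (g k) else dp), r.length = M := by
      split
      · exact cellSet_rows dp _ _ M hbk1 (by omega) h2
      · exact h2
    obtain ⟨g1, g2, g3⟩ := ih (if c k then cellSet dp (f k) (g k) else dp) h1' h2'
      (fun k' hk' => hb k' (List.mem_cons_of_mem _ hk'))
    refine ⟨by simpa using g1, by simpa using g2, ?_⟩
    intro i j hi hj
    rw [List.foldl_cons, g3 i j hi hj]
    have hmid : cellGet (if c k then cellSet dp (f k) (g k) else dp) i j
        = if c k = true ∧ f k = i ∧ g k = j then 1 else cellGet dp i j := by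
      by_cases hc : c k
      · rw [if_pos hc, cellGet_cellSet dp M _ _ i j h1 h2 hbk1 hbk2 hbk3 hbk4 hi hj]
        by_cases hij : i = f k ∧ j = g k
        · rw [if_pos hij, if_pos ⟨hc, hij.1.symm, hij.2.symm⟩]
        · rw [if_neg hij, if_neg (by rintro ⟨_, rfl, rfl⟩; exact hij ⟨rfl, rfl⟩)]
      · rw [if_neg hc, if_neg (by rintro ⟨hck, _⟩; exact hc hck)]
    rw [hmid]
    by_cases hex : ∃ k' ∈ L, c k' = true ∧ f k' = i ∧ g k' = j
    · obtain ⟨k', hk', hp⟩ := hex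
      rw [if_pos ⟨k', hk', hp⟩, if_pos ⟨k', List.mem_cons_of_mem _ hk', hp⟩]
    · rw [if_neg hex]
      by_cases hhd : c k = true ∧ f k = i ∧ g k = j
      · rw [if_pos hhd, if_pos ⟨k, List.mem_cons_self, hhd⟩]
      · rw [if_neg hhd, if_neg ?_]
        rintro ⟨k', hk', hp⟩
        rcases List.mem_cons.mp hk' with rfl | hk'
        · exact hhd hp
        · exact hex ⟨k', hk', hp⟩

-- names for A's intermediate tables (proof bookkeeping only)
def dpA0 (N : Int) : List (List Int) :=
  (PySem.List.pyRange 0 (N + 1) 1).map (fun _ => PySem.List.pyRepeat [(0 : Int)] (N + 1))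

def dpA1 (N : Int) : List (List Int) :=
  (PySem.List.pyRange 1 (N + 1) 1).foldl (fun dp i => cellSet dp i i) (dpA0 N)

def dpA2 (numbers : List Int) (N : Int) : List (List Int) :=
  (PySem.List.pyRange 1 N 1).foldl (fun dp i =>
      if PySem.List.pyGetD numbers (i - 1) 0 == PySem.List.pyGetD numbers i 0
      then cellSet dp i (i + 1) else dp) (dpA1 N)

def bodyA (numbers : List Int) (length : Int) : List (List Int) → Int → List (List Int) :=
  fun dp start =>
    let e := start + length - 1;
    if cellGet dp (start + 1) (e - 1) == 0 then dp
    else if PySem.List.pyGetD numbers (start - 1) 0 == PySem.List.pyGetD numbers (e - 1) 0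
         then cellSet dp start e else dp

theorem solution_eq (numbers : List Int) (N : Int) :
    solution numbers N = (PySem.List.pyRange 3 (N + 1) 1).foldl (fun dp length =>
      (PySem.List.pyRange 1 (N - length + 2) 1).foldl (bodyA numbers length) dp)
      (dpA2 numbers N) := rfl

theorem dpA1_spec (N : Int) (hN : 1 ≤ N) :
    (dpA1 N).length = (N + 1).toNat ∧ (∀ r ∈ dpA1 N, r.length = (N + 1).toNat) ∧
    ∀ i j : Int, 0 ≤ i → 0 ≤ j →
      cellGet (dpA1 N) i j = if 1 ≤ i ∧ i ≤ N ∧ j = i then 1 else 0 := by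
  have hshape := dp0_eq N
  have hfold : dpA1 N = (PySem.List.pyRange 1 (N + 1) 1).foldl
      (fun dp k => if (fun (_ : Int) => true) k then cellSet dp k k else dp)
      (List.replicate (N + 1).toNat (List.replicate (N + 1).toNat 0)) := by
    rw [dpA1, dpA0, hshape]; simp
  obtain ⟨g1, g2, g3⟩ := foldl_cellSet_generic (N + 1).toNat (fun _ => true)
    (fun k => k) (fun k => k) (PySem.List.pyRange 1 (N + 1) 1)
    (List.replicate (N + 1).toNat (List.replicate (N + 1).toNat 0))
    (by simp) (by intro r hr; exact List.eq_of_mem_replicate hr ▸ (by simp))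
    (by intro k hk
        rw [PySem.List.mem_pyRange_one] at hk
        simp only []
        refine ⟨by omega, by omega, by omega, by omega⟩)
  rw [hfold]
  refine ⟨g1, g2, ?_⟩
  intro i j hi hj
  rw [g3 i j hi hj, cellGet_replicate _ _ _ hi hj]
  by_cases hc : 1 ≤ i ∧ i ≤ N ∧ j = i
  · rw [if_pos hc, if_pos ?_]
    exact ⟨i, PySem.List.mem_pyRange_one.mpr (by omega), rfl, rfl, hc.2.2.symm⟩
  · rw [if_neg hc, if_neg ?_]
    rintro ⟨k, hk, _, rfl, rfl⟩
    rw [PySem.List.mem_pyRange_one] at hk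
    exact hc ⟨by omega, by omega, rfl⟩

theorem Tgt_of_not (numbers : List Int) (N i j : Int)
    (h : ¬ (1 ≤ i ∧ i ≤ j ∧ j ≤ N ∧ palChk numbers i j = true)) :
    Tgt numbers N i j = 0 := by
  rw [Tgt, if_neg h]

theorem dpA2_spec (numbers : List Int) (N : Int) (hN : 1 ≤ N) :
    (dpA2 numbers N).length = (N + 1).toNat ∧
    (∀ r ∈ dpA2 numbers N, r.length = (N + 1).toNat) ∧
    ∀ i j : Int, 0 ≤ i → 0 ≤ j →
      cellGet (dpA2 numbers N) i j = if j ≤ i + 1 then Tgt numbers N i j else 0 := by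
  obtain ⟨h1, h2, h3⟩ := dpA1_spec N hN
  obtain ⟨g1, g2, g3⟩ := foldl_cellSet_generic (N + 1).toNat
    (fun k => PySem.List.pyGetD numbers (k - 1) 0 == PySem.List.pyGetD numbers k 0)
    (fun k => k) (fun k => k + 1) (PySem.List.pyRange 1 N 1) (dpA1 N) h1 h2
    (by intro k hk
        rw [PySem.List.mem_pyRange_one] at hk
        simp only []
        refine ⟨by omega, by omega, by omega, by omega⟩)
  refine ⟨g1, g2, ?_⟩
  intro i j hi hj
  rw [dpA2, g3 i j hi hj, h3 i j hi hj, Tgt]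
  by_cases hex : ∃ k ∈ PySem.List.pyRange 1 N 1,
      (PySem.List.pyGetD numbers (k - 1) 0 == PySem.List.pyGetD numbers k 0) = true ∧
      (fun (k : Int) => k) k = i ∧ (fun (k : Int) => k + 1) k = j
  · obtain ⟨k, hk, hck, hfk, hgk⟩ := hex
    rw [PySem.List.mem_pyRange_one] at hk
    simp only [] at hfk hgk
    have hpal : palChk numbers i j = true := by
      rw [show j = i + 1 by omega, palChk_two, ← hfk]
      exact hck
    rw [if_pos ⟨k, PySem.List.mem_pyRange_one.mpr hk, hck, hfk, hgk⟩,
      if_pos (by omega : j ≤ i + 1),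
      if_pos ⟨by omega, by omega, by omega, hpal⟩]
  · rw [if_neg hex]
    by_cases hd : 1 ≤ i ∧ i ≤ N ∧ j = i
    · rw [if_pos hd, if_pos (by omega : j ≤ i + 1),
        if_pos ⟨hd.1, by omega, by omega, by rw [hd.2.2]; exact palChk_of_ge _ _ _ le_rfl⟩]
    · rw [if_neg hd]
      split_ifs with hle hc4
      · exfalso
        obtain ⟨c1, c2, c3, c4⟩ := hc4
        by_cases hji : j = i
        · exact hd ⟨c1, by omega, hji⟩
        · have hj1 : j = i + 1 := by omega
          rw [hj1, palChk_two] at c4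
          exact hex ⟨i, PySem.List.mem_pyRange_one.mpr (by omega), c4, rfl,
            by simp only []; omega⟩
      · rfl
      · rfl

theorem innerA (numbers : List Int) (N L : Int)
    (hL3 : 3 ≤ L) (hLN : L ≤ N) :
    ∀ (t : Nat) (a : Int) (dp : List (List Int)),
      (N - L + 2 - a).toNat = t → 1 ≤ a → a ≤ N - L + 2 →
      dp.length = (N + 1).toNat → (∀ r ∈ dp, r.length = (N + 1).toNat) →
      (∀ i j : Int, 0 ≤ i → 0 ≤ j → cellGet dp i j =
        if j ≤ i + (L - 2) ∨ (j = i + (L - 1) ∧ i < a) then Tgt numbers N i j else 0) →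
      (((PySem.List.pyRange a (N - L + 2) 1).foldl (bodyA numbers L) dp).length = (N + 1).toNat ∧
       (∀ r ∈ (PySem.List.pyRange a (N - L + 2) 1).foldl (bodyA numbers L) dp,
          r.length = (N + 1).toNat) ∧
       ∀ i j : Int, 0 ≤ i → 0 ≤ j →
         cellGet ((PySem.List.pyRange a (N - L + 2) 1).foldl (bodyA numbers L) dp) i j =
           if j ≤ i + (L - 2) ∨ (j = i + (L - 1) ∧ i < N - L + 2)
           then Tgt numbers N i j else 0) := by
  intro t
  induction t with
  | zero =>
    intro a dp ht h1a haN hs1 hs2 hinv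
    have ha : a = N - L + 2 := by omega
    subst ha
    rw [PySem.List.pyRange_one_eq_nil le_rfl, List.foldl_nil]
    exact ⟨hs1, hs2, hinv⟩
  | succ t ih =>
    intro a dp ht h1a haN hs1 hs2 hinv
    have halt : a < N - L + 2 := by omega
    rw [PySem.List.pyRange_one_cons halt, List.foldl_cons]
    have harg : a + L - 1 - 1 = a + L - 2 := by ring
    have hread : cellGet dp (a + 1) (a + L - 1 - 1) = Tgt numbers N (a + 1) (a + L - 1 - 1) := by
      rw [hinv (a + 1) (a + L - 1 - 1) (by omega) (by omega), if_pos (Or.inl (by omega))]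
    -- value of the guard cell
    by_cases hz : Tgt numbers N (a + 1) (a + L - 1 - 1) = 0
    · -- guard is 0: skip, and the cell of length L at start a is not a palindrome
      have hbody : bodyA numbers L dp a = dp := by
        simp only [bodyA]
        rw [hread, if_pos (by rw [hz]; rfl)]
      rw [hbody]
      have hpalf : palChk numbers (a + 1) (a + L - 2) = false := by
        by_contra hcon
        rw [Tgt, harg, if_pos ⟨by omega, by omega, by omega,
          Bool.ne_false_iff.mp hcon⟩] at hz
        exact one_ne_zero hz
      have hT0 : Tgt numbers N a (a + L - 1) = 0 := by
        rw [Tgt, if_neg]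
        rintro ⟨c1, c2, c3, c4⟩
        rw [palChk_step numbers a (a + L - 1) (by omega),
          show a + L - 1 - 1 = a + L - 2 by ring, hpalf, Bool.and_false] at c4
        exact Bool.false_ne_true c4
      refine ih (a + 1) dp (by omega) (by omega) (by omega) hs1 hs2 ?_
      intro i j hi hj
      rw [hinv i j hi hj]
      by_cases hnew : j = i + (L - 1) ∧ i = a
      · rw [if_neg (by omega), if_pos (Or.inr ⟨hnew.1, by omega⟩), hnew.1, hnew.2,
          show a + (L - 1) = a + L - 1 by ring, hT0]
      · by_cases hold : j ≤ i + (L - 2) ∨ (j = i + (L - 1) ∧ i < a)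
        · rw [if_pos hold, if_pos (by rcases hold with h | h; exact Or.inl h; exact Or.inr ⟨h.1, by omega⟩)]
        · rw [if_neg hold, if_neg (by rintro (h | h); exact hold (Or.inl h); omega)]
    · -- guard nonzero: the inner substring is a palindrome
      have hpalt : palChk numbers (a + 1) (a + L - 2) = true := by
        by_contra hcon
        rw [Tgt, harg, if_neg (by rintro ⟨_, _, _, c4⟩; exact hcon c4)] at hz
        exact hz rfl
      by_cases heq : (PySem.List.pyGetD numbers (a - 1) 0
          == PySem.List.pyGetD numbers (a + L - 1 - 1) 0) = true
      · -- match: the cell (a, a+L-1) is set, and it is a palindrome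
        have hbody : bodyA numbers L dp a = cellSet dp a (a + L - 1) := by
          simp only [bodyA]
          rw [hread, if_neg (by rw [beq_eq_false_iff_ne.mpr hz]; exact Bool.false_ne_true), if_pos heq]
        have hpalL : palChk numbers a (a + L - 1) = true := by
          rw [palChk_step numbers a (a + L - 1) (by omega),
            show a + L - 1 - 1 = a + L - 2 by ring]
          rw [Bool.and_eq_true]
          exact ⟨by rw [← harg]; exact heq, hpalt⟩
        have hT1 : Tgt numbers N a (a + L - 1) = 1 := by
          rw [Tgt, if_pos ⟨by omega, by omega, by omega, hpalL⟩]
        rw [hbody]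
        have hs1' : (cellSet dp a (a + L - 1)).length = (N + 1).toNat := by
          rw [cellSet_length]; exact hs1
        have hs2' : ∀ r ∈ cellSet dp a (a + L - 1), r.length = (N + 1).toNat :=
          cellSet_rows dp _ _ _ (by omega) (by omega) hs2
        refine ih (a + 1) _ (by omega) (by omega) (by omega) hs1' hs2' ?_
        intro i j hi hj
        rw [cellGet_cellSet dp (N + 1).toNat a (a + L - 1) i j hs1 hs2
          (by omega) (by omega) (by omega) (by omega) hi hj]
        by_cases hnew : i = a ∧ j = a + L - 1
        · rw [if_pos hnew, if_pos (Or.inr (by omega)), hnew.1, hnew.2, hT1]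
        · rw [if_neg hnew, hinv i j hi hj]
          by_cases hold : j ≤ i + (L - 2) ∨ (j = i + (L - 1) ∧ i < a)
          · rw [if_pos hold, if_pos (by rcases hold with h | h; exact Or.inl h; exact Or.inr ⟨h.1, by omega⟩)]
          · rw [if_neg hold, if_neg (by rintro (h | h); exact hold (Or.inl h); omega)]
      · -- ends differ: skip, and the length-L cell at a is not a palindrome
        have hbody : bodyA numbers L dp a = dp := by
          simp only [bodyA]
          rw [hread, if_neg (by rw [beq_eq_false_iff_ne.mpr hz]; exact Bool.false_ne_true), if_neg heq]
        have hT0 : Tgt numbers N a (a + L - 1) = 0 := by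
          rw [Tgt, if_neg]
          rintro ⟨c1, c2, c3, c4⟩
          rw [palChk_step numbers a (a + L - 1) (by omega)] at c4
          rw [Bool.and_eq_true] at c4
          exact heq c4.1
        rw [hbody]
        refine ih (a + 1) dp (by omega) (by omega) (by omega) hs1 hs2 ?_
        intro i j hi hj
        rw [hinv i j hi hj]
        by_cases hnew : j = i + (L - 1) ∧ i = a
        · rw [if_neg (by omega), if_pos (Or.inr ⟨hnew.1, by omega⟩), hnew.1, hnew.2,
            show a + (L - 1) = a + L - 1 by ring, hT0]
        · by_cases hold : j ≤ i + (L - 2) ∨ (j = i + (L - 1) ∧ i < a)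
          · rw [if_pos hold, if_pos (by rcases hold with h | h; exact Or.inl h; exact Or.inr ⟨h.1, by omega⟩)]
          · rw [if_neg hold, if_neg (by rintro (h | h); exact hold (Or.inl h); omega)]

theorem outerA (numbers : List Int) (N : Int) (hN : 1 ≤ N) :
    ∀ (t : Nat) (L : Int) (dp : List (List Int)),
      (N + 1 - L).toNat = t → 3 ≤ L →
      dp.length = (N + 1).toNat → (∀ r ∈ dp, r.length = (N + 1).toNat) →
      (∀ i j : Int, 0 ≤ i → 0 ≤ j →
        cellGet dp i j = if j ≤ i + (L - 2) then Tgt numbers N i j else 0) →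
      (((PySem.List.pyRange L (N + 1) 1).foldl (fun dp length =>
          (PySem.List.pyRange 1 (N - length + 2) 1).foldl (bodyA numbers length) dp) dp).length
            = (N + 1).toNat ∧
       (∀ r ∈ (PySem.List.pyRange L (N + 1) 1).foldl (fun dp length =>
          (PySem.List.pyRange 1 (N - length + 2) 1).foldl (bodyA numbers length) dp) dp,
          r.length = (N + 1).toNat) ∧
       ∀ i j : Int, 0 ≤ i → 0 ≤ j →
         cellGet ((PySem.List.pyRange L (N + 1) 1).foldl (fun dp length =>
           (PySem.List.pyRange 1 (N - length + 2) 1).foldl (bodyA numbers length) dp) dp) i j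
           = Tgt numbers N i j) := by
  intro t
  induction t with
  | zero =>
    intro L dp ht hL3 hs1 hs2 hinv
    rw [PySem.List.pyRange_one_eq_nil (by omega), List.foldl_nil]
    refine ⟨hs1, hs2, ?_⟩
    intro i j hi hj
    rw [hinv i j hi hj]
    by_cases hc : j ≤ i + (L - 2)
    · rw [if_pos hc]
    · rw [if_neg hc, Tgt_of_not numbers N i j (by rintro ⟨c1, c2, c3, _⟩; omega)]
  | succ t ih =>
    intro L dp ht hL3 hs1 hs2 hinv
    have hLN : L ≤ N := by omega
    rw [PySem.List.pyRange_one_cons (by omega), List.foldl_cons]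
    have hpre : ∀ i j : Int, 0 ≤ i → 0 ≤ j → cellGet dp i j =
        if j ≤ i + (L - 2) ∨ (j = i + (L - 1) ∧ i < 1) then Tgt numbers N i j else 0 := by
      intro i j hi hj
      rw [hinv i j hi hj]
      by_cases h0 : j ≤ i + (L - 2)
      · rw [if_pos h0, if_pos (Or.inl h0)]
      · by_cases h1 : j = i + (L - 1) ∧ i < 1
        · rw [if_neg h0, if_pos (Or.inr h1),
            Tgt_of_not numbers N i j (by rintro ⟨c1, _, _, _⟩; omega)]
        · rw [if_neg h0, if_neg (by rintro (h | h); exact h0 h; exact h1 h)]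
    obtain ⟨p1, p2, p3⟩ := innerA numbers N L hL3 hLN (N - L + 2 - 1).toNat 1 dp rfl
      le_rfl (by omega) hs1 hs2 hpre
    refine ih (L + 1) _ (by omega) (by omega) p1 p2 ?_
    intro i j hi hj
    rw [p3 i j hi hj]
    by_cases hc : j ≤ i + (L + 1 - 2)
    · by_cases h1 : j ≤ i + (L - 2)
      · rw [if_pos (Or.inl h1), if_pos hc]
      · by_cases h2 : i < N - L + 2
        · rw [if_pos (Or.inr ⟨by omega, h2⟩), if_pos hc]
        · rw [if_neg (by rintro (h | h); exact h1 h; omega), if_pos hc,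
            Tgt_of_not numbers N i j (by rintro ⟨c1, c2, c3, _⟩; omega)]
    · have hno : ¬ (j ≤ i + (L - 2) ∨ j = i + (L - 1) ∧ i < N - L + 2) := by
        rintro (h | h) <;> omega
      rw [if_neg hno, if_neg hc]

theorem cellGet_elem (dp : List (List Int)) (i j : Nat)
    (hi : i < dp.length) (hj : j < dp[i].length) :
    cellGet dp (i : Int) (j : Int) = dp[i][j] := by
  unfold cellGet
  rw [pyGetD_nonneg _ _ _ (by omega), pyGetD_nonneg _ _ _ (by omega),
    Int.toNat_natCast, Int.toNat_natCast]
  have e1 : dp.getD i [] = dp[i] := by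
    rw [List.getD_eq_getElem?_getD, List.getElem?_eq_getElem hi]
    rfl
  rw [e1, List.getD_eq_getElem?_getD, List.getElem?_eq_getElem hj]
  rfl

theorem main_eq (numbers : List Int) (N : Int) (hN : 1 ≤ N) :
    solution numbers N = solution_alt numbers N := by
  obtain ⟨h1, h2, h3⟩ := dpA2_spec numbers N hN
  obtain ⟨g1, g2, g3⟩ := outerA numbers N hN (N + 1 - 3).toNat 3 (dpA2 numbers N) rfl le_rfl
    h1 h2 (by intro i j hi hj; rw [h3 i j hi hj]; norm_num)
  rw [solution_eq numbers N]
  apply List.ext_getElem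
  · rw [g1]
    simp only [solution_alt, List.length_map, PySem.List.length_pyRange_one]
    norm_num
  intro k hk1 hk2
  apply List.ext_getElem
  · rw [g2 _ (List.getElem_mem hk1)]
    simp only [solution_alt, List.getElem_map, List.length_map,
      PySem.List.length_pyRange_one]
    norm_num
  intro j hj1 hj2
  have hkN : (k : Int) ≤ N := by
    have h := hk1
    rw [g1] at h
    omega
  have hjN : (j : Int) ≤ N := by
    have h := hj2
    simp only [solution_alt, List.getElem_map, List.length_map,
      PySem.List.length_pyRange_one] at h
    omega
  rw [← cellGet_elem _ k j hk1 hj1, g3 (k : Int) (j : Int) (by omega) (by omega), Tgt]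
  simp only [solution_alt, List.getElem_map, PySem.List.getElem_pyRange_one, zero_add]
  by_cases hp : 1 ≤ (k : Int) ∧ (k : Int) ≤ (j : Int) ∧ palChk numbers (k : Int) (j : Int) = true
  · rw [if_pos ⟨hp.1, hp.2.1, hjN, hp.2.2⟩, if_pos hp]
  · rw [if_neg (by rintro ⟨c1, c2, _, c4⟩; exact hp ⟨c1, c2, c4⟩), if_neg hp]

theorem solution_negN (numbers : List Int) (N : Int) (h : N < 0) :
    solution numbers N = solution_alt numbers N := by
  unfold solution solution_alt
  rw [PySem.List.pyRange_one_eq_nil (show N + 1 ≤ 0 by omega),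
    PySem.List.pyRange_one_eq_nil (show N + 1 ≤ 1 by omega),
    PySem.List.pyRange_one_eq_nil (show N ≤ 1 by omega),
    PySem.List.pyRange_one_eq_nil (show N + 1 ≤ 3 by omega)]
  simp

-- ===== VERDICT (by name: the statement is the Claim_ definition above) =====
theorem solution_spec : Claim_equal_solution := by
  intro numbers N _ _
  unfold Spec_solution
  rcases lt_trichotomy N 0 with h | h | h
  · exact solution_negN numbers N h
  · subst h
    rfl
  · exact main_eq numbers N (by omega)
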